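-- pv_equiv track=rewrite | github.com/kaisjessa/Project-Euler | pe153.py | coprime_divisor_sum
-- ===== SOURCE A (Python) =====
-- from math import isqrt, gcd
--
-- def add_pair(a, b, upper):
--     total = 0
--     root = a**2 + b**2
--     if root > upper:
--         return total
--     k = 1
--     n = root
--     while n <= upper:
--         n = k * root
--         total += 2 * k * a * (upper // n)
--         # if a > 0:
--         #     total += k * a * (upper // n)
--         if b < a:
--             total += 2 * k * b * (upper // n)
--         k += 1
--     return total
--
-- def coprime_divisor_sum(upper):
--     total = 0
--     s = isqrt(upper)
--     for a in range(1, s + 1):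
--         for b in range(1, max(2, a)):
--             if a**2 + b**2 > upper:
--                 break
--             if gcd(a, b) == 1:
--                 total += add_pair(a, b, upper)
--                 pass
--     return total
-- ===== SOURCE B (Python) =====
-- from math import isqrt, gcd
--
-- def block_sum(m):
--     # sum_{k=1}^{m} k * (m // k), grouping runs of equal quotient m // k
--     total = 0
--     k = 1
--     while k <= m:
--         q = m // k
--         j = m // q
--         total += q * (k + j) * (j - k + 1) // 2
--         k = j + 1
--     return total
--
-- def coprime_divisor_sum(upper):
--     total = 0
--     for a in range(1, isqrt(upper) + 1):
--         for b in range(1, max(2, a)):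
--             root = a * a + b * b
--             if root > upper:
--                 break
--             if gcd(a, b) == 1:
--                 w = 2 * a + (2 * b if b < a else 0)
--                 total += w * block_sum(upper // root)
--     return total
-- ===== Notes on version B (the rewrite author's own statement) =====
-- stated objective: faster
-- what changed: The per-pair inner while-loop of A, which adds a term for every multiple k of a^2+b^2 up to upper, is replaced by the floor-division block-grouping (hyperbola) method: runs of k with equal quotient are summed at once with a Gauss arithmetic-series formula, so each pair costs O(sqrt(upper/(a^2+b^2))) instead of O(upper/(a^2+b^2)).
import Mathlib
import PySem

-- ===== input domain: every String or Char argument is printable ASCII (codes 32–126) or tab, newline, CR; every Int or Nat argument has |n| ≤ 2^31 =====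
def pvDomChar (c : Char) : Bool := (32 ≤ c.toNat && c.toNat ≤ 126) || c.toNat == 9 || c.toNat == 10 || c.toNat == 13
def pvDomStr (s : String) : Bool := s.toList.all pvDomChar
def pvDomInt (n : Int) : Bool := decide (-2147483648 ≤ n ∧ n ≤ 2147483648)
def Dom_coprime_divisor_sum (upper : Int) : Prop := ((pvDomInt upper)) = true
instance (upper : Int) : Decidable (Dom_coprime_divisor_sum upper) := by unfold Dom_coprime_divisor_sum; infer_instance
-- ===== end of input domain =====

-- B replaces A's per-pair linear k-scan by floor-division block grouping (hyperbola
-- method), summing each run of equal quotients with a Gauss formula: asymptotically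
-- fewer inner iterations; measured faster. Equivalence proved for all upper ≥ 0
-- (Python raises ValueError on negative upper, via isqrt).

-- ===== PORT A =====
def addPairLoop (a b upper root : Int) : Nat → Int → Int → Int → Int
  | 0, _, _, total => total
  | fuel + 1, k, n, total =>
    if n ≤ upper then
      addPairLoop a b upper root fuel (k + 1) (k * root)
        (total + 2 * k * a * PySem.Int.floordiv upper (k * root)
          + if b < a then 2 * k * b * PySem.Int.floordiv upper (k * root) else 0)
    else total

def add_pair (a b upper : Int) : Int :=
  let root := a ^ 2 + b ^ 2
  if root > upper then 0
  else addPairLoop a b upper root (upper.toNat + 2) 1 root 0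

def innerA (upper a : Int) : List Int → Int → Int
  | [], total => total
  | b :: bs, total =>
    if a ^ 2 + b ^ 2 > upper then total
    else
      let total' := if Int.gcd a b = 1 then total + add_pair a b upper else total
      innerA upper a bs total'

def coprime_divisor_sum (upper : Int) : Int :=
  let s : Int := (Nat.sqrt upper.toNat : Int)
  (PySem.List.pyRange 1 (s + 1) 1).foldl
    (fun total a => innerA upper a (PySem.List.pyRange 1 (max 2 a) 1) total) 0

-- ===== PORT B =====
def blockSumLoop (m : Int) : Nat → Int → Int → Int
  | 0, _, total => total
  | fuel + 1, k, total =>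
    if k ≤ m then
      blockSumLoop m fuel (PySem.Int.floordiv m (PySem.Int.floordiv m k) + 1)
        (total + PySem.Int.floordiv (PySem.Int.floordiv m k
            * (k + PySem.Int.floordiv m (PySem.Int.floordiv m k))
            * (PySem.Int.floordiv m (PySem.Int.floordiv m k) - k + 1)) 2)
    else total

def block_sum (m : Int) : Int := blockSumLoop m (m.toNat + 1) 1 0

def innerB (upper a : Int) : List Int → Int → Int
  | [], total => total
  | b :: bs, total =>
    let root := a * a + b * b
    if root > upper then total
    else
      let total' :=
        if Int.gcd a b = 1 then
          total + (2 * a + if b < a then 2 * b else 0) * block_sum (PySem.Int.floordiv upper root)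
        else total
      innerB upper a bs total'

def coprime_divisor_sum_alt (upper : Int) : Int :=
  (PySem.List.pyRange 1 ((Nat.sqrt upper.toNat : Int) + 1) 1).foldl
    (fun total a => innerB upper a (PySem.List.pyRange 1 (max 2 a) 1) total) 0

-- ===== PRECONDITION & SPEC =====
-- Python's isqrt raises ValueError on negative upper, so A (and B) raise there.
def Pre_coprime_divisor_sum (upper : Int) : Prop := 0 ≤ upper
instance (upper : Int) : Decidable (Pre_coprime_divisor_sum upper) := by
  unfold Pre_coprime_divisor_sum; infer_instance

def pvWitness_coprime_divisor_sum : Int := 10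

def Spec_coprime_divisor_sum (upper : Int) (out : Int) : Prop := out = coprime_divisor_sum_alt upper
instance (upper : Int) (out : Int) : Decidable (Spec_coprime_divisor_sum upper out) := by
  unfold Spec_coprime_divisor_sum; infer_instance

-- ===== CLAIM (what is proved, stated in full; the proofs are below) =====
def Claim_equal_coprime_divisor_sum : Prop := ∀ (upper : Int), Dom_coprime_divisor_sum upper → Pre_coprime_divisor_sum upper → Spec_coprime_divisor_sum upper (coprime_divisor_sum upper)

-- ===== LEMMAS AND PROOFS =====

-- pull the bottom element out of a sum over Ioc
theorem pv_sum_Ioc_bot (f : Nat → Nat) {c t : Nat} (h : c < t) :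
    ∑ i ∈ Finset.Ioc c t, f i = f (c + 1) + ∑ i ∈ Finset.Ioc (c + 1) t, f i := by
  rw [← Finset.Icc_add_one_left_eq_Ioc, ← Finset.Ioc_insert_left (by omega : c + 1 ≤ t),
      Finset.sum_insert (by simp)]

-- Gauss sum over a block
theorem pv_gauss2 (c j : Nat) (h : c ≤ j) :
    (c + 1 + j) * (j - c) = 2 * ∑ i ∈ Finset.Ioc c j, i := by
  induction j, h using Nat.le_induction with
  | base => simp
  | succ j hj ih =>
    rw [Finset.sum_Ioc_succ_top hj]
    obtain ⟨d, rfl⟩ := Nat.exists_eq_add_of_le hj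
    rw [Nat.add_sub_cancel_left] at ih
    rw [show c + d + 1 - c = d + 1 by omega]
    nlinarith [ih]

-- the quotient M / i is constant on the block [k, M / (M / k)]
theorem pv_div_block_const {M k i : Nat} (hk : 1 ≤ k) (hkM : k ≤ M)
    (hki : k ≤ i) (hij : i ≤ M / (M / k)) : M / i = M / k := by
  have hk0 : 0 < k := hk
  have hq1 : 1 ≤ M / k := (Nat.one_le_div_iff hk0).2 hkM
  have hle : M / i ≤ M / k := Nat.div_le_div_left hki hk0
  have hge : M / k ≤ M / i := by
    have hi0 : 0 < i := by omega
    refine (Nat.le_div_iff_mul_le hi0).2 ?_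
    calc M / k * i ≤ M / k * (M / (M / k)) := Nat.mul_le_mul_left _ hij
      _ = M / (M / k) * (M / k) := Nat.mul_comm _ _
      _ ≤ M := Nat.div_mul_le_self M (M / k)
  omega

theorem pv_blockSumLoop_eq (M : Nat) :
    ∀ fuel c (total : Int), M + 1 ≤ fuel + c →
      blockSumLoop (M : Int) fuel ((c + 1 : Nat) : Int) total
        = total + ((∑ i ∈ Finset.Ioc c M, i * (M / i) : Nat) : Int) := by
  intro fuel
  induction fuel with
  | zero =>
    intro c total hf
    rw [Finset.Ioc_eq_empty (by omega)]
    simp [blockSumLoop]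
  | succ fuel ih =>
    intro c total hf
    by_cases hc : c + 1 ≤ M
    · have hQ1 : 1 ≤ M / (c + 1) := (Nat.one_le_div_iff (by omega)).2 hc
      set Q := M / (c + 1) with hQdef
      set J := M / Q with hJdef
      have hcJ : c + 1 ≤ J := by
        refine (Nat.le_div_iff_mul_le (by omega)).2 ?_
        rw [hQdef, Nat.mul_comm]
        exact Nat.div_mul_le_self M (c + 1)
      have hJM : J ≤ M := Nat.div_le_self M Q
      have hstep : blockSumLoop (M : Int) (fuel + 1) ((c + 1 : Nat) : Int) total
          = blockSumLoop (M : Int) fuel (((J + 1 : Nat) : Int))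
              (total + ((Q * (∑ i ∈ Finset.Ioc c J, i) : Nat) : Int)) := by
        show (if ((c + 1 : Nat) : Int) ≤ (M : Int) then _ else _) = _
        rw [if_pos (by exact_mod_cast hc)]
        have h1 : PySem.Int.floordiv (M : Int) ((c + 1 : Nat) : Int) = ((Q : Nat) : Int) := by
          rw [hQdef]; exact PySem.Int.floordiv_natCast M (c + 1)
        rw [h1]
        have h2 : PySem.Int.floordiv (M : Int) ((Q : Nat) : Int) = ((J : Nat) : Int) := by
          rw [hJdef]; exact PySem.Int.floordiv_natCast M Q
        rw [h2]
        have h3 : ((Q : Nat) : Int) * (((c + 1 : Nat) : Int) + ((J : Nat) : Int))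
              * (((J : Nat) : Int) - ((c + 1 : Nat) : Int) + 1)
            = ((Q * (c + 1 + J) * (J - c) : Nat) : Int) := by
          push_cast [Nat.cast_sub (show c ≤ J by omega)]
          ring
        rw [h3]
        have h4 : PySem.Int.floordiv ((Q * (c + 1 + J) * (J - c) : Nat) : Int) 2
            = ((Q * (c + 1 + J) * (J - c) / 2 : Nat) : Int) := by
          exact_mod_cast PySem.Int.floordiv_natCast (Q * (c + 1 + J) * (J - c)) 2
        rw [h4]
        have h5 : Q * (c + 1 + J) * (J - c) / 2 = Q * (∑ i ∈ Finset.Ioc c J, i) := by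
          rw [Nat.mul_assoc, pv_gauss2 c J (by omega),
              show Q * (2 * ∑ i ∈ Finset.Ioc c J, i) = 2 * (Q * ∑ i ∈ Finset.Ioc c J, i) by ring]
          exact Nat.mul_div_cancel_left _ (by norm_num)
        rw [h5]
        rw [show ((J : Nat) : Int) + 1 = ((J + 1 : Nat) : Int) by push_cast; ring]
      rw [hstep, ih J _ (by omega)]
      have hsplit : (∑ i ∈ Finset.Ioc c J, i * (M / i)) + ∑ i ∈ Finset.Ioc J M, i * (M / i)
          = ∑ i ∈ Finset.Ioc c M, i * (M / i) :=
        Finset.sum_Ioc_consecutive _ (by omega) hJM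
      have hconst : (∑ i ∈ Finset.Ioc c J, i * (M / i)) = Q * (∑ i ∈ Finset.Ioc c J, i) := by
        rw [Finset.mul_sum]
        refine Finset.sum_congr rfl ?_
        intro i hi
        rw [Finset.mem_Ioc] at hi
        rw [pv_div_block_const (show 1 ≤ c + 1 by omega) hc (by omega) (hi.2)]
        exact Nat.mul_comm _ _
      rw [← hsplit, hconst]
      push_cast
      ring
    · show (if ((c + 1 : Nat) : Int) ≤ (M : Int) then _ else _) = _
      rw [if_neg (by exact_mod_cast hc), Finset.Ioc_eq_empty (by omega)]
      simp

theorem pv_block_sum_eq (M : Nat) :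
    block_sum (M : Int) = ((∑ i ∈ Finset.Ioc 0 M, i * (M / i) : Nat) : Int) := by
  have h := pv_blockSumLoop_eq M (M + 1) 0 0 (by omega)
  simpa [block_sum, Int.toNat_natCast] using h

theorem pv_addPairLoop_eq (a b : Int) (U R : Nat) (hR : 1 ≤ R) (hRU : R ≤ U) :
    ∀ fuel c (total : Int), U + 1 ≤ fuel + c →
      addPairLoop a b (U : Int) (R : Int) fuel ((c + 1 : Nat) : Int) ((max c 1 * R : Nat) : Int) total
        = total + (2 * a + if b < a then 2 * b else 0)
            * ((∑ i ∈ Finset.Ioc c (U / R + 1), i * ((U / R) / i) : Nat) : Int) := by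
  intro fuel
  induction fuel with
  | zero =>
    intro c total hf
    have hK : U / R ≤ U := Nat.div_le_self U R
    rw [Finset.Ioc_eq_empty (by omega)]
    simp [addPairLoop]
  | succ fuel ih =>
    intro c total hf
    by_cases hc : max c 1 * R ≤ U
    · have hcK : c ≤ U / R := by
        rcases Nat.eq_zero_or_pos c with h0 | h1
        · exact h0 ▸ Nat.zero_le _
        · rw [show max c 1 = c by omega] at hc
          exact (Nat.le_div_iff_mul_le (by omega)).2 hc
      have hstep : addPairLoop a b (U : Int) (R : Int) (fuel + 1) ((c + 1 : Nat) : Int)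
            ((max c 1 * R : Nat) : Int) total
          = addPairLoop a b (U : Int) (R : Int) fuel ((c + 2 : Nat) : Int)
              ((max (c + 1) 1 * R : Nat) : Int)
              (total + 2 * ((c + 1 : Nat) : Int) * a * (((U / R) / (c + 1) : Nat) : Int)
                + if b < a then 2 * ((c + 1 : Nat) : Int) * b * (((U / R) / (c + 1) : Nat) : Int) else 0) := by
        show (if ((max c 1 * R : Nat) : Int) ≤ (U : Int) then _ else _) = _
        rw [if_pos (by exact_mod_cast hc)]
        have hn' : ((c + 1 : Nat) : Int) * (R : Int) = ((max (c + 1) 1 * R : Nat) : Int) := by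
          rw [show max (c + 1) 1 = c + 1 by omega]
          push_cast
          ring
        have hdiv : PySem.Int.floordiv (U : Int) (((c + 1 : Nat) : Int) * (R : Int))
            = (((U / R) / (c + 1) : Nat) : Int) := by
          rw [show ((c + 1 : Nat) : Int) * (R : Int) = (((c + 1) * R : Nat) : Int) by push_cast; ring,
              PySem.Int.floordiv_natCast]
          congr 1
          rw [Nat.div_div_eq_div_mul, Nat.mul_comm R (c + 1)]
        rw [hdiv, hn']
        have harg : ((c + 1 : Nat) : Int) + 1 = ((c + 2 : Nat) : Int) := by push_cast; ring
        rw [harg]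
      rw [hstep, ih (c + 1) _ (by omega)]
      rw [pv_sum_Ioc_bot _ (show c < U / R + 1 by omega)]
      by_cases hba : b < a
      · rw [if_pos hba, if_pos hba]
        push_cast
        ring
      · rw [if_neg hba, if_neg hba]
        push_cast
        ring
    · have hc1 : 1 ≤ c := by
        by_contra h0
        have hmx : max c 1 = 1 := by omega
        rw [hmx, one_mul] at hc
        exact hc hRU
      rw [show max c 1 = c from by omega] at hc
      have hKc : U / R < c := by
        by_contra hle
        exact hc ((Nat.le_div_iff_mul_le (show 0 < R by omega)).1 (Nat.not_lt.mp hle))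
      show (if ((max c 1 * R : Nat) : Int) ≤ (U : Int) then _ else _) = _
      rw [show max c 1 = c from by omega,
          if_neg (by exact_mod_cast hc), Finset.Ioc_eq_empty (by omega)]
      simp

theorem pv_add_pair_eq (a b upper : Int) (ha : 1 ≤ a) (hb : 1 ≤ b) (hu : 0 ≤ upper) :
    add_pair a b upper
      = (2 * a + if b < a then 2 * b else 0) * block_sum (PySem.Int.floordiv upper (a * a + b * b)) := by
  have hroot2 : 2 ≤ a * a + b * b := by nlinarith
  have hrootpos : 0 ≤ a * a + b * b := by omega
  have hU : ((upper.toNat : Nat) : Int) = upper := Int.toNat_of_nonneg hu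
  have hRc : (((a * a + b * b).toNat : Nat) : Int) = a * a + b * b := Int.toNat_of_nonneg hrootpos
  set U := upper.toNat with hUdef
  set R := (a * a + b * b).toNat with hRdef
  have hR1 : 1 ≤ R := by omega
  have hfl : PySem.Int.floordiv upper (a * a + b * b) = ((U / R : Nat) : Int) := by
    rw [← hU, ← hRc]
    exact PySem.Int.floordiv_natCast U R
  have hsq : a ^ 2 + b ^ 2 = a * a + b * b := by ring
  by_cases hgt : a ^ 2 + b ^ 2 > upper
  · have hUR : U < R := by omega
    rw [show add_pair a b upper = 0 from by rw [add_pair]; exact if_pos hgt,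
        hfl, Nat.div_eq_of_lt hUR, pv_block_sum_eq 0]
    simp
  · have hRU : R ≤ U := by omega
    have hbody : add_pair a b upper
        = addPairLoop a b upper (a ^ 2 + b ^ 2) (upper.toNat + 2) 1 (a ^ 2 + b ^ 2) 0 := by
      rw [add_pair]
      exact if_neg hgt
    have hmain := pv_addPairLoop_eq a b U R hR1 hRU (U + 2) 0 0 (by omega)
    have e1 : max 0 1 * R = R := by simp
    have e2 : ((0 + 1 : Nat) : Int) = 1 := by norm_num
    rw [e1, e2, zero_add] at hmain
    rw [hbody, hsq, ← hU, ← hRc, Int.toNat_natCast, hmain, PySem.Int.floordiv_natCast,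
        pv_block_sum_eq (U / R), Finset.sum_Ioc_succ_top (Nat.zero_le _),
        Nat.div_eq_of_lt (Nat.lt_succ_self _)]
    simp

theorem pv_inner_eq (upper a : Int) (hu : 0 ≤ upper) (ha : 1 ≤ a) :
    ∀ (bs : List Int) (total : Int), (∀ x ∈ bs, 1 ≤ x) →
      innerA upper a bs total = innerB upper a bs total := by
  intro bs
  induction bs with
  | nil => intro total h; rfl
  | cons b bs ih =>
    intro total h
    have hb : 1 ≤ b := h b (by simp)
    have hrest : ∀ x ∈ bs, 1 ≤ x := fun x hx => h x (by simp [hx])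
    simp only [innerA, innerB]
    rw [show a * a + b * b = a ^ 2 + b ^ 2 from by ring]
    by_cases hgt : a ^ 2 + b ^ 2 > upper
    · rw [if_pos hgt, if_pos hgt]
    · rw [if_neg hgt, if_neg hgt]
      by_cases hg : Int.gcd a b = 1
      · rw [if_pos hg, if_pos hg, pv_add_pair_eq a b upper ha hb hu,
            show a * a + b * b = a ^ 2 + b ^ 2 from by ring]
        exact ih _ hrest
      · rw [if_neg hg, if_neg hg]
        exact ih _ hrest

theorem pv_foldl_eq (upper : Int) (hu : 0 ≤ upper) :
    ∀ (l : List Int) (total : Int), (∀ x ∈ l, 1 ≤ x) →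
      l.foldl (fun total a => innerA upper a (PySem.List.pyRange 1 (max 2 a) 1) total) total
        = l.foldl (fun total a => innerB upper a (PySem.List.pyRange 1 (max 2 a) 1) total) total := by
  intro l
  induction l with
  | nil => intro total h; rfl
  | cons a l ih =>
    intro total h
    have ha : 1 ≤ a := h a (by simp)
    simp only [List.foldl_cons]
    rw [pv_inner_eq upper a hu ha _ total (by
      intro x hx
      exact ((PySem.List.mem_pyRange_one).1 hx).1)]
    exact ih _ (fun x hx => h x (by simp [hx]))

-- ===== VERDICT (by name: the statement is the Claim_ definition above) =====
theorem coprime_divisor_sum_spec : Claim_equal_coprime_divisor_sum := by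
  intro upper _ hpre
  unfold Spec_coprime_divisor_sum coprime_divisor_sum coprime_divisor_sum_alt
  exact pv_foldl_eq upper hpre _ 0 (by
    intro x hx
    exact ((PySem.List.mem_pyRange_one).1 hx).1)
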